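-- pv_equiv track=rewrite | github.com/Sidesplitter/Informatica-Olympiade-2016-2017 | src/A1/a1.py | get_square
-- ===== SOURCE A (Python) =====
-- def get_square(size=0):
--     """
--     Returns a drawn square with '*' as the border and '-' on the inside of the square
--     :param size: The size of the square
--     :return: A ASCII square
--     """
--
--     output = ''
--     for i in range(0, size):
--
--         # The first and the last row only contain '*'
--         if i == 0 or i == size - 1:
--             output += '*' * size + '\n'
--             continue
--
--         output += '*' + ('-' * (size - 2)) + '*\n'
--
--     return output
-- ===== SOURCE B (Python) =====
-- def get_square(size=0):
--     """Closed form, no loop: top border, the middle row repeated, top border again."""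
--     if size <= 0:
--         return ''
--     if size == 1:
--         return '*\n'
--     top = '*' * size + '\n'
--     mid = '*' + '-' * (size - 2) + '*\n'
--     return top + mid * (size - 2) + top
-- ===== Notes on version B (the rewrite author's own statement) =====
-- stated objective: alternative
-- what changed: B replaces A's row-by-row loop with a loop-free closed form: an early-return chain for the degenerate sizes, then top border + middle row repeated by string repetition + top border.
import Mathlib
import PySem

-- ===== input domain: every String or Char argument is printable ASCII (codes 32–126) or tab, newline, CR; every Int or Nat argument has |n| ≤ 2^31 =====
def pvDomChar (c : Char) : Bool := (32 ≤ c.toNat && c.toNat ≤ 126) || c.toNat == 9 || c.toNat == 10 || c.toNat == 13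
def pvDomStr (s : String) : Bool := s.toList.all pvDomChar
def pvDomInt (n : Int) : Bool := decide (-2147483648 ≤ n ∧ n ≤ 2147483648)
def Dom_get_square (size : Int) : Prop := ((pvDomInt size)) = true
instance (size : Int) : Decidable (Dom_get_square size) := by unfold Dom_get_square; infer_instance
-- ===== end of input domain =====

-- B is a loop-free closed form (top border + repeated middle row + top border) instead of A's row loop; alternative decomposition.

-- ===== PORT A =====
def get_square (size : Int) : String :=
  String.ofList ((PySem.List.pyRange 0 size 1).foldl (fun out i =>
    if i == 0 || i == size - 1 then
      out ++ PySem.List.pyRepeat ['*'] size ++ ['\n']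
    else
      out ++ ['*'] ++ PySem.List.pyRepeat ['-'] (size - 2) ++ ['*', '\n']) [])

-- ===== PORT B =====
def get_square_alt (size : Int) : String :=
  if size ≤ 0 then ""
  else if size == 1 then String.ofList ['*', '\n']
  else
    String.ofList
      ((PySem.List.pyRepeat ['*'] size ++ ['\n'])
        ++ PySem.List.pyRepeat ('*' :: PySem.List.pyRepeat ['-'] (size - 2) ++ ['*', '\n']) (size - 2)
        ++ (PySem.List.pyRepeat ['*'] size ++ ['\n']))

-- ===== PRECONDITION & SPEC =====
def Spec_get_square (size : Int) (out : String) : Prop := out = get_square_alt size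
instance (size : Int) (out : String) : Decidable (Spec_get_square size out) := by unfold Spec_get_square; infer_instance

-- ===== CLAIM (what is proved, stated in full; the proofs are below) =====
def Claim_equal_get_square : Prop := ∀ (size : Int), Dom_get_square size → Spec_get_square size (get_square size)

-- ===== LEMMAS AND PROOFS =====

-- A's loop body, rewritten so the appended row is a single expression (for foldl_append_eq_flatMap).
def pvRowA (size i : Int) : List Char :=
  if i == 0 || i == size - 1 then
    PySem.List.pyRepeat ['*'] size ++ ['\n']
  else
    ['*'] ++ PySem.List.pyRepeat ['-'] (size - 2) ++ ['*', '\n']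

theorem pv_foldl_eq_flatMap (size : Int) :
    (PySem.List.pyRange 0 size 1).foldl (fun out i =>
      if i == 0 || i == size - 1 then
        out ++ PySem.List.pyRepeat ['*'] size ++ ['\n']
      else
        out ++ ['*'] ++ PySem.List.pyRepeat ['-'] (size - 2) ++ ['*', '\n']) []
    = (PySem.List.pyRange 0 size 1).flatMap (pvRowA size) := by
  rw [PySem.List.foldl_congr_mem _ _
      (fun out i => out ++ pvRowA size i) _ ?_,
    PySem.List.foldl_append_eq_flatMap, List.nil_append]
  intro acc x _
  unfold pvRowA
  by_cases hc : (x == 0 || x == size - 1) = true <;> simp [hc]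

theorem pv_mid (size : Int) (h2 : 2 ≤ size) :
    (PySem.List.pyRange 1 (size - 1) 1).flatMap (pvRowA size)
      = PySem.List.pyRepeat ('*' :: PySem.List.pyRepeat ['-'] (size - 2) ++ ['*', '\n']) (size - 2) := by
  have hmap : (PySem.List.pyRange 1 (size - 1) 1).map (pvRowA size)
      = List.replicate (size - 2).toNat ('*' :: PySem.List.pyRepeat ['-'] (size - 2) ++ ['*', '\n']) := by
    rw [List.map_congr_left (g := fun _ => '*' :: PySem.List.pyRepeat ['-'] (size - 2) ++ ['*', '\n']) ?_]
    · rw [List.map_const', PySem.List.length_pyRange_one]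
      congr 1
      omega
    · intro j hj
      rw [PySem.List.mem_pyRange_one] at hj
      have hj0 : (j == 0) = false := by simp; omega
      have hj1 : (j == size - 1) = false := by simp; omega
      unfold pvRowA
      simp [hj0, hj1]
  rw [List.flatMap_def, hmap]
  rfl

-- ===== VERDICT (by name: the statement is the Claim_ definition above) =====
theorem get_square_spec : Claim_equal_get_square := by
  intro size _
  unfold Spec_get_square get_square get_square_alt
  rw [pv_foldl_eq_flatMap]
  by_cases h0 : size ≤ 0
  · rw [PySem.List.pyRange_one_eq_nil h0]
    simp [h0]
  · by_cases h1 : size = 1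
    · subst h1
      decide
    · have h2 : 2 ≤ size := by omega
      have hle : ((size ≤ 0) = False) := by simp; omega
      have heq1 : (size == 1) = false := by simp [h1]
      rw [PySem.List.pyRange_one_cons (by omega : (0:Int) < size)]
      have hsplit : PySem.List.pyRange (0 + 1) size 1
          = PySem.List.pyRange 1 (size - 1) 1 ++ [size - 1] := by
        have h := PySem.List.pyRange_one_succ_right (a := 1) (b := size - 1) (by omega)
        simpa [show size - 1 + 1 = size by ring] using h
      rw [hsplit]
      simp only [hle, heq1, if_false, Bool.false_eq_true, List.flatMap_cons, List.flatMap_append,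
        pv_mid size h2]
      have hA0 : pvRowA size 0 = PySem.List.pyRepeat ['*'] size ++ ['\n'] := by
        unfold pvRowA; simp
      have hA1 : pvRowA size (size - 1) = PySem.List.pyRepeat ['*'] size ++ ['\n'] := by
        unfold pvRowA; simp
      rw [hA0, hA1]
      simp
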